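-- pv_equiv track=rewrite | github.com/augustotimm/pfsp-genetic | tests.py | evaluateFactibiltySolution
-- ===== SOURCE A (Python) =====
-- tasksQuantity =5  #Quantidade de tarefas N
--
-- def evaluateFactibiltySolution(solution):
--     #Cria a Lista de ordem de execucao
--     order = createOrderList(solution)
--     #Verifica se a ordem é possivel
--     for i in range(tasksQuantity):
--         for k in range ( i +1, tasksQuantity):
--             kIndex = order.index(k)
--             iIndex = order.index(i)
--
--             if(solution[i][k] == 0):
--                 #Se i vem depois de k, mas na lista ordenada está ao contrario, é infactivel
--                 if(iIndex<kIndex):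
--                     return []
--             else:
--                 #Se i vem antes de k, mas na lista ordenada está ao contrario, é infactivel
--                 if(iIndex>kIndex):
--                     return []
--
--     return order
--
-- def createOrderList(solution):
--     order = []
--     #Cria a Lista de ordem de execucao
--     for i in range(tasksQuantity):
--         for k in range(i+1, tasksQuantity):
--             if(i== 0):
--                 #Se i é 0, todos os elementos vao ser novos na lista
--                 if( k ==1):
--                     if(solution[i][k] == 0):
--                         order.insert(0,k)
--                         order.insert(1,i)
--                     else:
--                          order.insert(0,i)
--                          order.insert(1,k)
--                 else:
--                     iIndex = order.index(i)
--                     if(solution[i][k] == 0):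
--                         order.insert(iIndex,k)
--                     else:
--                         order.insert(iIndex+1,k)
--             else:
--                 iIndex = order.index(i)
--                 kIndex = order.index(k)
--                 if(solution[i][k] == 0):
--                     #se K vem depois de I vai ser necessario trocar a posicao de K
--                     if(kIndex > iIndex):
--                         order.remove(k)
--                         order.insert(iIndex,k)
--                 else:
--                     if(kIndex < iIndex):
--                         order.remove(k)
--                         order.insert(iIndex,k)
--     return order
-- ===== SOURCE B (Python) =====
-- tasksQuantity = 5
--
--
-- def evaluateFactibiltySolution(solution):
--     # Count, for each task j, how many tasks must come before it.
--     before = [0] * tasksQuantity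
--     for a in range(tasksQuantity):
--         for b in range(a + 1, tasksQuantity):
--             if solution[a][b] == 0:
--                 # b precedes a
--                 before[a] += 1
--             else:
--                 before[b] += 1
--     order = sorted(range(tasksQuantity), key=lambda j: before[j])
--     # Verify the order satisfies every pairwise precedence; else infeasible.
--     for i in range(tasksQuantity):
--         for k in range(i + 1, tasksQuantity):
--             kIndex = order.index(k)
--             iIndex = order.index(i)
--             if solution[i][k] == 0:
--                 if iIndex < kIndex:
--                     return []
--             else:
--                 if iIndex > kIndex:
--                     return []
--     return order
-- ===== Notes on version B (the rewrite author's own statement) =====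
-- stated objective: simpler
-- what changed: B replaces A's incremental insert/remove construction of the execution order by counting, for each task, how many tasks must precede it and sorting the 5 tasks by that count; the pairwise feasibility check (return [] on a violation) is kept.
import Mathlib
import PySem

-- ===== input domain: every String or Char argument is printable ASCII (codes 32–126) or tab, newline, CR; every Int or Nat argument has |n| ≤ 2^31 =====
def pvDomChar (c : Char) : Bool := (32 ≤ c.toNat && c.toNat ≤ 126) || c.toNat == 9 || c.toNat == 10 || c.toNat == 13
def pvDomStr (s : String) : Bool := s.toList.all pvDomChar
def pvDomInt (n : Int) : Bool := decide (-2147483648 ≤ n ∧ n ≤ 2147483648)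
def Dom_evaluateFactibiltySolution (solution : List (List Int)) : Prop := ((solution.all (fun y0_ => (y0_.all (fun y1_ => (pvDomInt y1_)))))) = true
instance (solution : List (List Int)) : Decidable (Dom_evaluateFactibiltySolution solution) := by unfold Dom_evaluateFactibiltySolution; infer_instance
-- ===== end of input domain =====

-- B builds the order by counting predecessors and sorting instead of A's incremental
-- insert/remove construction; the shared pairwise feasibility check is unchanged.
-- Both ports read the matrix only through 'solution[i][k] == 0' (i<k<5), abstracted as pvZero.

-- solution[i][k] == 0 ; under Pre_ the indices are in range, so the getD defaults are never used.
def pvZero (solution : List (List Int)) (i k : Int) : Bool :=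
  (PySem.List.pyGet? ((PySem.List.pyGet? solution i).getD []) k).getD 0 == 0

-- shared inner body of the feasibility check loop (identical code in A and in Source B)
def pvCheckStep (z : Int → Int → Bool) (order : List Int) (i k : Int) : Bool :=
  let kIndex := (PySem.List.index? order k).getD 0
  let iIndex := (PySem.List.index? order i).getD 0
  if z i k then decide (iIndex < kIndex) else decide (kIndex < iIndex)

-- ===== PORT A =====
-- inner body of createOrderList's nested loop
def pvColStep (z : Int → Int → Bool) (i : Int) (order : List Int) (k : Int) : List Int :=
  if i = 0 then
    if k = 1 then
      if z i k then PySem.List.insert (PySem.List.insert order 0 k) 1 i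
      else PySem.List.insert (PySem.List.insert order 0 i) 1 k
    else
      let iIndex := ((PySem.List.index? order i).getD 0 : Nat)
      if z i k then PySem.List.insert order (iIndex : Int) k
      else PySem.List.insert order ((iIndex : Int) + 1) k
  else
    let iIndex := ((PySem.List.index? order i).getD 0 : Nat)
    let kIndex := ((PySem.List.index? order k).getD 0 : Nat)
    if z i k then
      if iIndex < kIndex then
        PySem.List.insert ((PySem.List.remove? order k).getD order) (iIndex : Int) k
      else order
    else
      if kIndex < iIndex then
        PySem.List.insert ((PySem.List.remove? order k).getD order) (iIndex : Int) k
      else order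

-- the pairwise check loop with early return [] (flag form), shared text of A and Source B
def pvBad (z : Int → Int → Bool) (order : List Int) : Bool :=
  (PySem.List.pyRange 0 5 1).foldl
    (fun b i => (PySem.List.pyRange (i + 1) 5 1).foldl (fun b k => b || pvCheckStep z order i k) b) false

-- createOrderList
def pvOrderA (z : Int → Int → Bool) : List Int :=
  (PySem.List.pyRange 0 5 1).foldl
    (fun order i => (PySem.List.pyRange (i + 1) 5 1).foldl (pvColStep z i) order) []

def pvEvalA (z : Int → Int → Bool) : List Int :=
  if pvBad z (pvOrderA z) then [] else pvOrderA z

def evaluateFactibiltySolution (solution : List (List Int)) : List Int :=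
  pvEvalA (pvZero solution)

-- ===== PORT B =====
-- predecessor counts: before[a] += 1 when b must precede a, else before[b] += 1
def pvBefore (z : Int → Int → Bool) : List Int :=
  (PySem.List.pyRange 0 5 1).foldl
    (fun before a => (PySem.List.pyRange (a + 1) 5 1).foldl
      (fun before b =>
        if z a b then PySem.List.pySetD before a (PySem.List.pyGetD before a 0 + 1)
        else PySem.List.pySetD before b (PySem.List.pyGetD before b 0 + 1)) before)
    (List.replicate 5 (0 : Int))

-- order = sorted(range(5), key=lambda j: before[j])
def pvOrderB (z : Int → Int → Bool) : List Int :=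
  PySem.List.sorted (PySem.List.pyRange 0 5 1) (fun j => PySem.List.pyGetD (pvBefore z) j 0)

def pvEvalB (z : Int → Int → Bool) : List Int :=
  if pvBad z (pvOrderB z) then [] else pvOrderB z

def evaluateFactibiltySolution_alt (solution : List (List Int)) : List Int :=
  pvEvalB (pvZero solution)

-- ===== PRECONDITION & SPEC =====
-- Exactly the inputs where the Python raises no IndexError: rows 0..3 are accessed at column
-- indices up to 4 (row 4 is never indexed), so A returns iff there are ≥ 4 rows and the first
-- four rows each have ≥ 5 entries.
def Pre_evaluateFactibiltySolution (solution : List (List Int)) : Prop :=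
  4 ≤ solution.length ∧ ∀ r ∈ solution.take 4, 5 ≤ r.length
instance (solution : List (List Int)) : Decidable (Pre_evaluateFactibiltySolution solution) := by
  unfold Pre_evaluateFactibiltySolution; infer_instance

def pvWitness_evaluateFactibiltySolution : List (List Int) :=
  [[0, 1, 1, 1, 1], [0, 0, 1, 1, 1], [0, 0, 0, 1, 1], [0, 0, 0, 0, 1], [0, 0, 0, 0, 0]]

def Spec_evaluateFactibiltySolution (solution : List (List Int)) (out : List Int) : Prop := out = evaluateFactibiltySolution_alt solution
instance (solution : List (List Int)) (out : List Int) : Decidable (Spec_evaluateFactibiltySolution solution out) := by unfold Spec_evaluateFactibiltySolution; infer_instance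

-- ===== CLAIM (what is proved, stated in full; the proofs are below) =====
def Claim_equal_evaluateFactibiltySolution : Prop := ∀ (solution : List (List Int)), Dom_evaluateFactibiltySolution solution → Pre_evaluateFactibiltySolution solution → Spec_evaluateFactibiltySolution solution (evaluateFactibiltySolution solution)

-- ===== LEMMAS AND PROOFS =====

-- a canonical predicate determined by the 10 booleans z i k for 0 ≤ i < k < 5
def pvFn (b01 b02 b03 b04 b12 b13 b14 b23 b24 b34 : Bool) : Int → Int → Bool :=
  fun i k =>
    if i = 0 then (if k = 1 then b01 else if k = 2 then b02 else if k = 3 then b03 else b04)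
    else if i = 1 then (if k = 2 then b12 else if k = 3 then b13 else b14)
    else if i = 2 then (if k = 3 then b23 else b24)
    else b34

lemma pvFn_eval (z : Int → Int → Bool) (i k : Int) (h0 : 0 ≤ i) (hik : i < k) (h5 : k < 5) :
    pvFn (z 0 1) (z 0 2) (z 0 3) (z 0 4) (z 1 2) (z 1 3) (z 1 4) (z 2 3) (z 2 4) (z 3 4) i k
      = z i k := by
  have hi5 : i < 5 := by omega
  unfold pvFn
  interval_cases i <;> interval_cases k <;> simp

lemma pvCheckStep_congr (z z' : Int → Int → Bool) (order : List Int) (i k : Int)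
    (h : z i k = z' i k) : pvCheckStep z order i k = pvCheckStep z' order i k := by
  unfold pvCheckStep; rw [h]

lemma pvColStep_congr (z z' : Int → Int → Bool) (i : Int) (order : List Int) (k : Int)
    (h : z i k = z' i k) : pvColStep z i order k = pvColStep z' i order k := by
  unfold pvColStep; rw [h]

lemma pvBad_congr (z z' : Int → Int → Bool) (order : List Int)
    (h : ∀ i k, 0 ≤ i → i < k → k < 5 → z i k = z' i k) : pvBad z order = pvBad z' order := by
  unfold pvBad
  apply PySem.List.foldl_congr_mem
  intro acc i hi
  apply PySem.List.foldl_congr_mem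
  intro acc' k hk
  rw [PySem.List.mem_pyRange_one] at hi hk
  rw [pvCheckStep_congr z z' order i k (h i k hi.1 (by omega) (by omega))]

lemma pvOrderA_congr (z z' : Int → Int → Bool)
    (h : ∀ i k, 0 ≤ i → i < k → k < 5 → z i k = z' i k) : pvOrderA z = pvOrderA z' := by
  unfold pvOrderA
  apply PySem.List.foldl_congr_mem
  intro acc i hi
  apply PySem.List.foldl_congr_mem
  intro acc' k hk
  rw [PySem.List.mem_pyRange_one] at hi hk
  exact pvColStep_congr z z' i acc' k (h i k hi.1 (by omega) (by omega))

lemma pvEvalA_congr (z z' : Int → Int → Bool)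
    (h : ∀ i k, 0 ≤ i → i < k → k < 5 → z i k = z' i k) : pvEvalA z = pvEvalA z' := by
  unfold pvEvalA
  rw [pvOrderA_congr z z' h, pvBad_congr z z' (pvOrderA z') h]

lemma pvBefore_congr (z z' : Int → Int → Bool)
    (h : ∀ i k, 0 ≤ i → i < k → k < 5 → z i k = z' i k) : pvBefore z = pvBefore z' := by
  unfold pvBefore
  apply PySem.List.foldl_congr_mem
  intro acc a ha
  apply PySem.List.foldl_congr_mem
  intro acc' b hb
  rw [PySem.List.mem_pyRange_one] at ha hb
  rw [h a b ha.1 (by omega) (by omega)]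

lemma pvEvalB_congr (z z' : Int → Int → Bool)
    (h : ∀ i k, 0 ≤ i → i < k → k < 5 → z i k = z' i k) : pvEvalB z = pvEvalB z' := by
  unfold pvEvalB pvOrderB
  rw [pvBefore_congr z z' h]
  rw [pvBad_congr z z'
    (PySem.List.sorted (PySem.List.pyRange 0 5 1) (fun j => PySem.List.pyGetD (pvBefore z') j 0)) h]

set_option maxRecDepth 100000 in
set_option maxHeartbeats 4000000 in
lemma pvBrute : ∀ b01 b02 b03 b04 b12 b13 b14 b23 b24 b34 : Bool,
    pvEvalA (pvFn b01 b02 b03 b04 b12 b13 b14 b23 b24 b34)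
      = pvEvalB (pvFn b01 b02 b03 b04 b12 b13 b14 b23 b24 b34) := by
  decide

lemma pvEval_eq (z : Int → Int → Bool) : pvEvalA z = pvEvalB z := by
  have hA := pvEvalA_congr z
    (pvFn (z 0 1) (z 0 2) (z 0 3) (z 0 4) (z 1 2) (z 1 3) (z 1 4) (z 2 3) (z 2 4) (z 3 4))
    (fun i k h0 hik h5 => (pvFn_eval z i k h0 hik h5).symm)
  have hB := pvEvalB_congr z
    (pvFn (z 0 1) (z 0 2) (z 0 3) (z 0 4) (z 1 2) (z 1 3) (z 1 4) (z 2 3) (z 2 4) (z 3 4))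
    (fun i k h0 hik h5 => (pvFn_eval z i k h0 hik h5).symm)
  rw [hA, hB, pvBrute]

-- ===== VERDICT (by name: the statement is the Claim_ definition above) =====
theorem evaluateFactibiltySolution_spec : Claim_equal_evaluateFactibiltySolution := by
  intro solution _ _
  unfold Spec_evaluateFactibiltySolution evaluateFactibiltySolution evaluateFactibiltySolution_alt
  exact pvEval_eq (pvZero solution)
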